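-- pv_equiv track=rewrite | github.com/yjsayya/Algorithms | 2. 문제유형/2-3.코딩테스트/진학/Problem4.py | solution
-- ===== SOURCE A (Python) =====
-- def solution(n):
--     if n <= 2:
--         return 1
--
--     dp = [0] * (n + 1)
--     dp[0] = dp[1] = 1
--
--     for i in range(2, n + 1):
--         for j in range(1, i + 1):
--             dp[i] += dp[j - 1] * dp[i - j]
--
--     return dp[n-1] % 10007
-- ===== SOURCE B (Python) =====
-- def solution(n):
--     if n <= 2:
--         return 1
--     # Catalan(n-1) via the linear product recurrence C(k) = C(k-1)*(4k-2)/(k+1)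
--     # (division is exact), instead of the O(n^2) convolution DP.
--     c = 1
--     for k in range(1, n):
--         c = c * (4 * k - 2) // (k + 1)
--     return c % 10007
-- ===== Notes on version B (the rewrite author's own statement) =====
-- stated objective: faster
-- what changed: Replaces the O(n^2) Segner convolution DP over a full dp table by the linear product recurrence C(k) = C(k-1)*(4k-2)//(k+1) (exact integer division), keeping only one running Catalan number.
import Mathlib
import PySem

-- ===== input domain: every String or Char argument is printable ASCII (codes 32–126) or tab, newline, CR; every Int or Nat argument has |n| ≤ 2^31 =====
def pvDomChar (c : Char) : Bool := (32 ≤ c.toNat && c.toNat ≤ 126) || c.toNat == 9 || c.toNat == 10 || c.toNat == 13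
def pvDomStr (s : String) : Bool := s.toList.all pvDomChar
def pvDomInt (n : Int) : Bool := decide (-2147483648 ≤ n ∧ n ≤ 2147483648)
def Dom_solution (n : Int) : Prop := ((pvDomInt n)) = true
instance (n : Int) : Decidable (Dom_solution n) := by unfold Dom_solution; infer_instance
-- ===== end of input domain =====

-- B replaces A's O(n^2) Segner convolution DP by the linear Catalan product
-- recurrence C(k) = C(k-1)*(4k-2)//(k+1) (exact division); return values agree.

-- ===== PORT A =====
-- literal port of A: dp table of length n+1, nested loops filling dp[i] by convolution,
-- result dp[n-1] % 10007. All indices touched are nonnegative and in range, so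
-- pyGetD/pySetD are exact here.
def solution (n : Int) : Int :=
  if n ≤ 2 then 1
  else
    let dp : List Int := List.replicate (n + 1).toNat 0
    let dp := PySem.List.pySetD dp 0 1
    let dp := PySem.List.pySetD dp 1 1
    let dp := (PySem.List.pyRange 2 (n + 1) 1).foldl (fun dp i =>
      (PySem.List.pyRange 1 (i + 1) 1).foldl (fun dp j =>
        PySem.List.pySetD dp i
          (PySem.List.pyGetD dp i 0 +
            PySem.List.pyGetD dp (j - 1) 0 * PySem.List.pyGetD dp (i - j) 0)) dp) dp
    PySem.Int.mod (PySem.List.pyGetD dp (n - 1) 0) 10007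

-- ===== PORT B =====
-- literal port of B: one running value, k = 1 .. n-1, exact floor division.
def solution_alt (n : Int) : Int :=
  if n ≤ 2 then 1
  else
    let c := (PySem.List.pyRange 1 n 1).foldl
      (fun c k => PySem.Int.floordiv (c * (4 * k - 2)) (k + 1)) 1
    PySem.Int.mod c 10007

-- ===== PRECONDITION & SPEC =====
def Spec_solution (n : Int) (out : Int) : Prop := out = solution_alt n
instance (n : Int) (out : Int) : Decidable (Spec_solution n out) := by unfold Spec_solution; infer_instance

-- ===== CLAIM (what is proved, stated in full; the proofs are below) =====
def Claim_equal_solution : Prop := ∀ (n : Int), Dom_solution n → Spec_solution n (solution n)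

-- ===== LEMMAS AND PROOFS =====

-- the Nat identity behind B's recurrence: catalan m * (4m+2) = (m+2) * catalan (m+1)
lemma catalan_ratio (m : Nat) :
    catalan m * (4 * m + 2) = (m + 2) * catalan (m + 1) := by
  apply Nat.eq_of_mul_eq_mul_left (show 0 < m + 1 by omega)
  have h1 := succ_mul_catalan_eq_centralBinom m
  have h2 := succ_mul_catalan_eq_centralBinom (m + 1)
  have h3 := Nat.succ_mul_centralBinom_succ m
  calc (m + 1) * (catalan m * (4 * m + 2))
      = (2 * (2 * m + 1)) * ((m + 1) * catalan m) := by ring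
    _ = (2 * (2 * m + 1)) * m.centralBinom := by rw [h1]
    _ = (m + 1) * (m + 1).centralBinom := h3.symm
    _ = (m + 1) * ((m + 1 + 1) * catalan (m + 1)) := by rw [h2]
    _ = (m + 1) * ((m + 2) * catalan (m + 1)) := by ring

-- B's loop computes catalan m
lemma alt_loop (m : Nat) :
    (PySem.List.pyRange 1 ((m : Int) + 1) 1).foldl
      (fun c k => PySem.Int.floordiv (c * (4 * k - 2)) (k + 1)) 1
      = (catalan m : Int) := by
  induction m with
  | zero => simp [PySem.List.pyRange_one_eq_nil]
  | succ m ih =>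
    rw [show (((m + 1 : Nat) : Int) + 1) = ((m : Int) + 1) + 1 by push_cast; ring,
      PySem.List.pyRange_one_succ_right (by omega), List.foldl_append, ih]
    simp only [List.foldl_cons, List.foldl_nil]
    have key : (catalan m : Int) * (4 * ((m : Int) + 1) - 2)
        = ((m : Int) + 1 + 1) * (catalan (m + 1) : Int) := by
      have h := catalan_ratio m
      have h' : ((catalan m * (4 * m + 2) : Nat) : Int)
          = (((m + 2) * catalan (m + 1) : Nat) : Int) := by exact_mod_cast h
      push_cast at h'
      linear_combination h'
    rw [key, PySem.Int.floordiv_eq_ediv_of_pos (by omega),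
      Int.mul_ediv_cancel_left _ (by omega)]

-- partial convolution sum: Σ_{j<t} catalan j * catalan (m-1-j)
def pcat (m t : Nat) : Int :=
  ((Finset.range t).sum (fun j => catalan j * catalan (m - 1 - j)) : Nat)

lemma pcat_zero (m : Nat) : pcat m 0 = 0 := by simp [pcat]

lemma pcat_succ (m t : Nat) :
    pcat m (t + 1) = pcat m t + (catalan t : Int) * (catalan (m - 1 - t) : Int) := by
  simp [pcat, Finset.sum_range_succ]

lemma pcat_self (m : Nat) (hm : 1 ≤ m) : pcat m m = (catalan m : Int) := by
  obtain ⟨s, rfl⟩ : ∃ s, m = s + 1 := ⟨m - 1, by omega⟩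
  have := catalan_succ s
  rw [Fin.sum_univ_eq_sum_range (fun i => catalan i * catalan (s - i)) (s + 1)] at this
  simp only [pcat, Nat.add_sub_cancel, this]

-- the dp state: catalan prefix of length m, value v at index m, zeros after
def dpSt (L m : Nat) (v : Int) : List Int :=
  (List.range m).map (fun i => (catalan i : Int)) ++ v :: List.replicate (L - m - 1) 0

lemma dpSt_getD_lt (L m : Nat) (v : Int) (k : Nat) (hk : k < m) :
    (dpSt L m v).getD k 0 = (catalan k : Int) := by
  rw [dpSt, List.getD_eq_getElem?_getD, List.getElem?_append_left (by simpa using hk)]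
  simp [hk]

lemma dpSt_getD_self (L m : Nat) (v : Int) :
    (dpSt L m v).getD m 0 = v := by
  rw [dpSt, List.getD_eq_getElem?_getD, List.getElem?_append_right (by simp)]
  simp

lemma dpSt_set_self (L m : Nat) (v w : Int) :
    (dpSt L m v).set m w = dpSt L m w := by
  rw [dpSt, dpSt, List.set_append_right _ _ (by simp)]
  simp

-- one inner-loop body step at state dpSt L m (pcat m t), j = t+1
lemma inner_step (L m t : Nat) (ht : t < m) :
    PySem.List.pySetD (dpSt L m (pcat m t)) (m : Int)
      (PySem.List.pyGetD (dpSt L m (pcat m t)) (m : Int) 0 +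
        PySem.List.pyGetD (dpSt L m (pcat m t)) (((t : Int) + 1) - 1) 0 *
          PySem.List.pyGetD (dpSt L m (pcat m t)) ((m : Int) - ((t : Int) + 1)) 0)
      = dpSt L m (pcat m (t + 1)) := by
  have h1 : ((t : Int) + 1) - 1 = ((t : Nat) : Int) := by ring
  have h2 : (m : Int) - ((t : Int) + 1) = ((m - (t + 1) : Nat) : Int) := by
    push_cast [Nat.cast_sub (by omega : t + 1 ≤ m)]; ring
  rw [h1, h2]
  simp only [PySem.List.pyGetD_natCast, PySem.List.pySetD_natCast]
  rw [dpSt_getD_self, dpSt_getD_lt L m _ t ht, dpSt_getD_lt L m _ _ (by omega),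
    dpSt_set_self, pcat_succ, show m - (t + 1) = m - 1 - t by omega]

-- inner loop from j = t+1 to m finishes the convolution
lemma inner_loop (L m : Nat) (hm : 1 ≤ m) :
    ∀ t, t ≤ m →
    (PySem.List.pyRange ((t : Int) + 1) ((m : Int) + 1) 1).foldl
      (fun dp j => PySem.List.pySetD dp (m : Int)
        (PySem.List.pyGetD dp (m : Int) 0 +
          PySem.List.pyGetD dp (j - 1) 0 * PySem.List.pyGetD dp ((m : Int) - j) 0))
      (dpSt L m (pcat m t))
      = dpSt L m (catalan m) := by
  intro t ht
  induction h : m - t generalizing t with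
  | zero =>
    have hmt : t = m := by omega
    subst hmt
    rw [PySem.List.pyRange_one_eq_nil (by omega), List.foldl_nil, pcat_self _ (by omega)]
  | succ s ih =>
    have htm : t < m := by omega
    rw [PySem.List.pyRange_one_cons (by omega), List.foldl_cons, inner_step L m t htm]
    have : ((t : Int) + 1) + 1 = (((t + 1 : Nat) : Int)) + 1 := by push_cast; ring
    rw [this]
    exact ih (t + 1) (by omega) (by omega)

-- outer-loop state: catalan prefix of length m, zeros after
def dpO (L m : Nat) : List Int :=
  (List.range m).map (fun i => (catalan i : Int)) ++ List.replicate (L - m) 0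

lemma dpO_eq_dpSt (L m : Nat) (h : m < L) : dpO L m = dpSt L m 0 := by
  rw [dpO, dpSt]
  congr 1
  conv_lhs => rw [show L - m = (L - m - 1) + 1 by omega]
  rw [List.replicate_succ]

lemma dpSt_cat_eq_dpO (L m : Nat) : dpSt L m (catalan m) = dpO L (m + 1) := by
  rw [dpSt, dpO, List.range_succ, List.map_append]
  simp [List.append_assoc]
  all_goals omega

lemma outer_loop (L : Nat) : ∀ m, 2 ≤ m → m ≤ L →
    (PySem.List.pyRange (m : Int) (L : Int) 1).foldl
      (fun dp i => (PySem.List.pyRange 1 (i + 1) 1).foldl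
        (fun dp j => PySem.List.pySetD dp i
          (PySem.List.pyGetD dp i 0 +
            PySem.List.pyGetD dp (j - 1) 0 * PySem.List.pyGetD dp (i - j) 0)) dp)
      (dpO L m)
      = dpO L L := by
  intro m hm hmL
  induction h : L - m generalizing m with
  | zero =>
    have : m = L := by omega
    subst this
    rw [PySem.List.pyRange_one_eq_nil (by omega), List.foldl_nil]
  | succ s ih =>
    have hlt : m < L := by omega
    rw [PySem.List.pyRange_one_cons (by exact_mod_cast hlt), List.foldl_cons]
    have hinner : (PySem.List.pyRange 1 ((m : Int) + 1) 1).foldl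
        (fun dp j => PySem.List.pySetD dp (m : Int)
          (PySem.List.pyGetD dp (m : Int) 0 +
            PySem.List.pyGetD dp (j - 1) 0 * PySem.List.pyGetD dp ((m : Int) - j) 0))
        (dpO L m)
        = dpO L (m + 1) := by
      have h := inner_loop L m (by omega) 0 (by omega)
      rw [pcat_zero] at h
      simp only [Nat.cast_zero, zero_add] at h
      rw [dpO_eq_dpSt L m hlt, h, dpSt_cat_eq_dpO]
    rw [hinner, show (m : Int) + 1 = (((m + 1 : Nat) : Int)) by push_cast; ring]
    exact ih (m + 1) (by omega) (by omega) (by omega)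

lemma init_eq_dpO (L : Nat) (hL : 2 ≤ L) :
    PySem.List.pySetD (PySem.List.pySetD (List.replicate L (0 : Int)) 0 1) 1 1
      = dpO L 2 := by
  obtain ⟨s, rfl⟩ : ∃ s, L = s + 2 := ⟨L - 2, by omega⟩
  rw [dpO]
  simp [PySem.List.pySetD_of_nonneg, List.replicate_succ, List.range_succ, catalan_one]

lemma dpO_getD_full (L k : Nat) (hk : k < L) :
    (dpO L L).getD k 0 = (catalan k : Int) := by
  rw [dpO, Nat.sub_self, List.replicate_zero, List.append_nil,
    List.getD_eq_getElem?_getD]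
  simp [hk]

-- ===== VERDICT (by name: the statement is the Claim_ definition above) =====
theorem solution_spec : Claim_equal_solution := by
  intro n _
  unfold Spec_solution solution solution_alt
  by_cases h : n ≤ 2
  · simp [h]
  · simp only [if_neg h]
    replace h : 2 < n := by omega
    set L : Nat := (n + 1).toNat with hLdef
    have hL4 : 4 ≤ L := by omega
    have hn1 : n + 1 = (L : Int) := by omega
    have hn : n = ((L - 1 : Nat) : Int) := by omega
    -- A side
    have hA : (PySem.List.pyRange 2 (n + 1) 1).foldl
        (fun dp i => (PySem.List.pyRange 1 (i + 1) 1).foldl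
          (fun dp j => PySem.List.pySetD dp i
            (PySem.List.pyGetD dp i 0 +
              PySem.List.pyGetD dp (j - 1) 0 * PySem.List.pyGetD dp (i - j) 0)) dp)
        (PySem.List.pySetD (PySem.List.pySetD (List.replicate L (0 : Int)) 0 1) 1 1)
        = dpO L L := by
      rw [init_eq_dpO L (by omega), hn1,
        show (2 : Int) = (((2 : Nat) : Int)) by simp]
      exact outer_loop L 2 (by omega) (by omega)
    rw [hA]
    -- final reads
    have hidx : n - 1 = ((L - 2 : Nat) : Int) := by omega
    rw [hidx, PySem.List.pyGetD_natCast, dpO_getD_full L (L - 2) (by omega)]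
    -- B side
    rw [hn, show ((L - 1 : Nat) : Int) = ((L - 2 : Nat) : Int) + 1 by omega,
      alt_loop (L - 2)]
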